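-- pv_equiv track=rewrite | github.com/juliancanaless/autofill-ai | src/autofill_pipeline.py | _find_closest_category
-- ===== SOURCE A (Python) =====
-- from typing import Dict, List, Optional, Tuple, Any
--
-- def _find_closest_category(suggested: str, valid_categories: List[str]) -> str:
--     """Find closest matching category using simple string similarity"""
--
--     if not valid_categories:
--         return suggested
--
--     suggested_lower = suggested.lower()
--
--     # Exact match first
--     for cat in valid_categories:
--         if suggested_lower == cat.lower():
--             return cat
--
--     # Partial match
--     for cat in valid_categories:
--         if suggested_lower in cat.lower() or cat.lower() in suggested_lower:
--             return cat
--
--     # Fallback to first category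
--     return valid_categories[0]
-- ===== SOURCE B (Python) =====
-- def _find_closest_category(suggested, valid_categories):
--     """Find closest matching category using simple string similarity"""
--     if not valid_categories:
--         return suggested
--     suggested_lower = suggested.lower()
--     first_partial = None
--     for cat in valid_categories:
--         cat_lower = cat.lower()
--         if suggested_lower == cat_lower:
--             return cat
--         if first_partial is None and (suggested_lower in cat_lower or cat_lower in suggested_lower):
--             first_partial = cat
--     return first_partial if first_partial is not None else valid_categories[0]
-- ===== Notes on version B (the rewrite author's own statement) =====
-- stated objective: simpler
-- what changed: Replaces A's two sequential scans (exact-match pass, then partial-match pass) with a single pass that returns on an exact match and records the first partial match in a variable resolved after the loop.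
import Mathlib
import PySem

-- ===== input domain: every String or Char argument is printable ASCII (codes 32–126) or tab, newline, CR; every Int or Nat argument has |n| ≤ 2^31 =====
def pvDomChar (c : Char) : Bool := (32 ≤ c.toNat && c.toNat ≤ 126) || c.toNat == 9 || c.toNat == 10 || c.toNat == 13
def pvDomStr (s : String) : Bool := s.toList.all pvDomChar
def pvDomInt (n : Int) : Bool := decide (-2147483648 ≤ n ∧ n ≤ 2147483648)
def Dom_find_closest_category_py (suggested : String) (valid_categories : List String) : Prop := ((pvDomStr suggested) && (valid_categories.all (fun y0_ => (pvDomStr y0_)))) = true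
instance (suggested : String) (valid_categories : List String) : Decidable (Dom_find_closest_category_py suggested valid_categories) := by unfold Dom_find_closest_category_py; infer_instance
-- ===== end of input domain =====

-- B replaces A's two sequential scans by one pass recording the first partial match; simpler, same result.

-- ===== PORT A =====
-- A's first loop: return the first cat with suggested_lower == cat.lower()
def pvAExact (sl : String) : List String → Option String
  | [] => none
  | c :: t => if sl == PySem.Str.lower c then some c else pvAExact sl t

-- A's second loop: return the first cat with a substring match either way
def pvAPartial (sl : String) : List String → Option String
  | [] => none
  | c :: t =>
    if PySem.Str.isIn sl (PySem.Str.lower c) || PySem.Str.isIn (PySem.Str.lower c) sl then some c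
    else pvAPartial sl t

def find_closest_category_py (suggested : String) (valid_categories : List String) : String :=
  match valid_categories with
  | [] => suggested
  | c0 :: t =>
    let sl := PySem.Str.lower suggested
    match pvAExact sl (c0 :: t) with
    | some c => c
    | none =>
      match pvAPartial sl (c0 :: t) with
      | some c => c
      | none => c0

-- ===== PORT B =====
-- B's single loop: return on exact match; thread first_partial (fp) through, yield it at the end
def pvBScan (sl : String) (fp : Option String) : List String → Option String
  | [] => fp
  | c :: t =>
    let cl := PySem.Str.lower c
    if sl == cl then some c
    else
      pvBScan sl
        (if fp.isNone && (PySem.Str.isIn sl cl || PySem.Str.isIn cl sl) then some c else fp) t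

def find_closest_category_py_alt (suggested : String) (valid_categories : List String) : String :=
  match valid_categories with
  | [] => suggested
  | c0 :: t =>
    match pvBScan (PySem.Str.lower suggested) none (c0 :: t) with
    | some c => c
    | none => c0

-- ===== PRECONDITION & SPEC =====
def Spec_find_closest_category_py (suggested : String) (valid_categories : List String) (out : String) : Prop := out = find_closest_category_py_alt suggested valid_categories
instance (suggested : String) (valid_categories : List String) (out : String) : Decidable (Spec_find_closest_category_py suggested valid_categories out) := by unfold Spec_find_closest_category_py; infer_instance

-- ===== CLAIM (what is proved, stated in full; the proofs are below) =====
def Claim_equal_find_closest_category_py : Prop := ∀ (suggested : String) (valid_categories : List String), Dom_find_closest_category_py suggested valid_categories → Spec_find_closest_category_py suggested valid_categories (find_closest_category_py suggested valid_categories)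

-- ===== LEMMAS AND PROOFS =====

-- B's single pass equals: exact match if any, else the carried fp, else A's partial pass.
theorem pvBScan_eq (sl : String) (fp : Option String) (l : List String) :
    pvBScan sl fp l =
      match pvAExact sl l with
      | some c => some c
      | none => match fp with
        | some p => some p
        | none => pvAPartial sl l := by
  induction l generalizing fp with
  | nil => cases fp <;> rfl
  | cons c t ih =>
    simp only [pvBScan, pvAExact, pvAPartial]
    by_cases h : sl == PySem.Str.lower c
    · simp [h]
    · simp only [h, ih]
      cases fp with
      | some p => simp
      | none =>
        cases hp : (PySem.Str.isIn sl (PySem.Str.lower c) || PySem.Str.isIn (PySem.Str.lower c) sl) with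
        | true =>
          simp only [Option.isNone_none, Bool.true_and, hp, if_true]
          cases pvAExact sl t <;> simp
        | false =>
          simp only [Option.isNone_none, Bool.true_and, Bool.false_eq_true, if_false]

-- ===== VERDICT (by name: the statement is the Claim_ definition above) =====
theorem find_closest_category_py_spec : Claim_equal_find_closest_category_py := by
  intro suggested vc _
  unfold Spec_find_closest_category_py find_closest_category_py find_closest_category_py_alt
  cases vc with
  | nil => rfl
  | cons c0 t =>
    simp only [pvBScan_eq]
    cases pvAExact (PySem.Str.lower suggested) (c0 :: t) <;>
      cases pvAPartial (PySem.Str.lower suggested) (c0 :: t) <;> simp
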